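-- pv_equiv track=rewrite | github.com/AndrewTrieu/LUT-yliopisto | BM40A1500 Data Structures and Algorithms/Assignments/Week 7/sales.py | sales
-- ===== SOURCE A (Python) =====
-- def sales(cars, customers) -> int:
--     cars.sort()
--     customers.sort()
--     sales = 0
--     for customer in customers:
--         for car in cars:
--             if car <= customer:
--                 sales += 1
--                 cars.remove(car)
--                 break
--     return sales
-- ===== SOURCE B (Python) =====
-- def sales(cars, customers) -> int:
--     # Two-pointer sweep: sort both; each customer in ascending budget order buys
--     # the cheapest remaining car iff it fits the budget.
--     cars.sort()
--     customers.sort()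
--     i = 0
--     sold = 0
--     for budget in customers:
--         if i < len(cars) and cars[i] <= budget:
--             i += 1
--             sold += 1
--     return sold
-- ===== Notes on version B (the rewrite author's own statement) =====
-- stated objective: faster
-- what changed: Replaces the per-customer linear scan over (and removal from) the car list by a single two-pointer sweep over both sorted lists: on a sorted list the first affordable car is always the cheapest remaining one, so an index suffices.
import Mathlib
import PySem

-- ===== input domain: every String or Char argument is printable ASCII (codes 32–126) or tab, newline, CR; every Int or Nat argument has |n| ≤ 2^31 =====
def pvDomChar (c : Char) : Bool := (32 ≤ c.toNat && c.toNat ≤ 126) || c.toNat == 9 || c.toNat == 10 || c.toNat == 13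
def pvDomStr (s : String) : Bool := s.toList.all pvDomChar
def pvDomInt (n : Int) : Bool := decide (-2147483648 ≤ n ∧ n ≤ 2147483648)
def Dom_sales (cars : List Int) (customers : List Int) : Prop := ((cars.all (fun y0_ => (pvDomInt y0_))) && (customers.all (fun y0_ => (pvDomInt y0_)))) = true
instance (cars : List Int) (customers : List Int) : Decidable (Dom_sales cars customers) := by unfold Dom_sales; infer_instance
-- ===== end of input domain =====

-- B replaces A's per-customer scan over (and removal from) the car list with a two-pointer
-- sweep over both sorted lists (asymptotically faster). Return-value equivalence only:
-- both Pythons sort their arguments in place, and A additionally removes sold cars from `cars`.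


-- ===== PORT A =====
-- inner 'for car in cars: if car <= customer: … break': first car ≤ customer, if any
def salesFind : List Int → Int → Option Int
  | [], _ => none
  | car :: rest, c => if car ≤ c then some car else salesFind rest c

-- outer 'for customer in customers' loop, state = (remaining cars, sales)
def salesLoop : List Int → List Int → Int → Int
  | _, [], s => s
  | cars, c :: cs, s =>
    match salesFind cars c with
    | some car => salesLoop ((PySem.List.remove? cars car).getD cars) cs (s + 1)
      -- cars.remove(car): car was found in cars, so remove? is always some here
    | none => salesLoop cars cs s

def sales (cars : List Int) (customers : List Int) : Int :=
  salesLoop (PySem.List.sorted cars (fun x => x) false)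
    (PySem.List.sorted customers (fun x => x) false) 0

-- ===== PORT B =====
-- two-pointer sweep: state = (index into sorted cars, sold)
def salesSweep : List Int → List Int → Nat → Int → Int
  | _, [], _, sold => sold
  | cs, c :: rest, i, sold =>
    if i < cs.length ∧ cs.getD i 0 ≤ c then salesSweep cs rest (i + 1) (sold + 1)
    else salesSweep cs rest i sold

def sales_alt (cars : List Int) (customers : List Int) : Int :=
  salesSweep (PySem.List.sorted cars (fun x => x) false)
    (PySem.List.sorted customers (fun x => x) false) 0 0

-- ===== PRECONDITION & SPEC =====
def Spec_sales (cars : List Int) (customers : List Int) (out : Int) : Prop := out = sales_alt cars customers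
instance (cars : List Int) (customers : List Int) (out : Int) : Decidable (Spec_sales cars customers out) := by unfold Spec_sales; infer_instance

-- ===== CLAIM (what is proved, stated in full; the proofs are below) =====
def Claim_equal_sales : Prop := ∀ (cars : List Int) (customers : List Int), Dom_sales cars customers → Spec_sales cars customers (sales cars customers)

-- ===== LEMMAS AND PROOFS =====

-- the inner scan finds nothing when no element is affordable
theorem salesFind_none {l : List Int} {c : Int} (h : ∀ x ∈ l, ¬ x ≤ c) :
    salesFind l c = none := by
  induction l with
  | nil => rfl
  | cons a t ih =>
    simp only [salesFind]
    rw [if_neg (h a (by simp))]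
    exact ih (fun x hx => h x (by simp [hx]))

-- core invariant: on a sorted car list, A's loop over the suffix from index i
-- computes exactly what B's sweep computes from index i
theorem loop_eq_sweep (cs : List Int) (hp : cs.Pairwise (· ≤ ·)) :
    ∀ (custs : List Int) (i : Nat) (sold : Int),
      salesLoop (cs.drop i) custs sold = salesSweep cs custs i sold := by
  intro custs
  induction custs with
  | nil => intro i sold; cases cs.drop i <;> rfl
  | cons c rest ih =>
    intro i sold
    by_cases hi : i < cs.length
    · have hdrop : cs.drop i = cs[i] :: cs.drop (i + 1) := List.drop_eq_getElem_cons hi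
      have hgd : cs.getD i 0 = cs[i] := List.getD_eq_getElem cs 0 hi
      by_cases hc : cs[i] ≤ c
      · have : salesLoop (cs.drop i) (c :: rest) sold
            = salesLoop (cs.drop (i + 1)) rest (sold + 1) := by
          rw [hdrop]
          simp only [salesLoop, salesFind, if_pos hc, PySem.List.remove?_cons_self,
            Option.getD_some]
        rw [this, ih (i + 1) (sold + 1)]
        simp only [salesSweep]
        rw [if_pos ⟨hi, by rw [hgd]; exact hc⟩]
      · -- cheapest remaining car too expensive ⇒ all remaining cars too expensive
        have hpd : (cs.drop i).Pairwise (· ≤ ·) :=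
          hp.sublist (List.drop_sublist i cs)
        have hall : ∀ x ∈ cs.drop i, ¬ x ≤ c := by
          rw [hdrop] at hpd ⊢
          intro x hx
          rcases List.mem_cons.mp hx with h1 | h2
          · rw [h1]; exact hc
          · have := (List.pairwise_cons.mp hpd).1 x h2
            omega
        have : salesLoop (cs.drop i) (c :: rest) sold = salesLoop (cs.drop i) rest sold := by
          cases hcd : cs.drop i with
          | nil => rfl
          | cons a t =>
            rw [hcd] at hall
            simp [salesLoop, salesFind_none hall]
        rw [this, ih i sold]
        simp only [salesSweep]
        rw [if_neg (by rw [hgd]; exact fun h => hc h.2)]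
    · have hnil : cs.drop i = [] := List.drop_eq_nil_of_le (by omega)
      have : salesLoop (cs.drop i) (c :: rest) sold = salesLoop (cs.drop i) rest sold := by
        rw [hnil]; rfl
      rw [this, ih i sold]
      simp only [salesSweep]
      rw [if_neg (fun h => hi h.1)]

-- ===== VERDICT (by name: the statement is the Claim_ definition above) =====
theorem sales_spec : Claim_equal_sales := by
  intro cars customers _
  unfold Spec_sales sales sales_alt
  have hp : (PySem.List.sorted cars (fun x => x) false).Pairwise (· ≤ ·) :=
    PySem.List.sorted_pairwise cars (fun x => x)
  simpa using loop_eq_sweep _ hp (PySem.List.sorted customers (fun x => x) false) 0 0
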